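-- pv_equiv track=rewrite | github.com/Nikhil-Goyal18/SkillCraft-Technology | Task-3/task-3.py | has_no_sequences
-- ===== SOURCE A (Python) =====
-- import string
--
-- def has_no_sequences(pwd, seq_length=3):
--     if len(pwd) < seq_length:
--         return True
--
--     sequences = []
--     alphabet = string.ascii_lowercase
--     digits = string.digits
--
--     for i in range(len(alphabet) - seq_length + 1):
--         sequences.append(alphabet[i:i+seq_length])
--         sequences.append(alphabet[i:i+seq_length][::-1])
--
--     for i in range(len(digits) - seq_length + 1):
--         sequences.append(digits[i:i+seq_length])
--         sequences.append(digits[i:i+seq_length][::-1])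
--
--     pwd_lower = pwd.lower()
--     for i in range(len(pwd_lower) - seq_length + 1):
--         segment = pwd_lower[i:i+seq_length]
--         if segment in sequences:
--             return False
--     return True
-- ===== SOURCE B (Python) =====
-- def has_no_sequences(pwd, seq_length=3):
--     if len(pwd) < seq_length:
--         return True
--     low = pwd.lower()
--     for i in range(len(low) - seq_length + 1):
--         w = low[i:i+seq_length]
--         if len(w) >= 2:
--             d = ord(w[1]) - ord(w[0])
--             if d != 1 and d != -1:
--                 continue
--         if all(ord(b) - ord(a) == 1 for a, b in zip(w, w[1:])) or \
--            all(ord(a) - ord(b) == 1 for a, b in zip(w, w[1:])):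
--             if all('a' <= c <= 'z' for c in w) or all('0' <= c <= '9' for c in w):
--                 return False
--     return True
-- ===== Notes on version B (the rewrite author's own statement) =====
-- stated objective: alternative
-- what changed: A precomputes the full table of ascending/descending alphabet/digit runs on every call and scans it for each window; B tests each window directly (cheap first-step reject, then: adjacent code-point differences all +1 or all -1, and all characters in one class) with no table.
import Mathlib
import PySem

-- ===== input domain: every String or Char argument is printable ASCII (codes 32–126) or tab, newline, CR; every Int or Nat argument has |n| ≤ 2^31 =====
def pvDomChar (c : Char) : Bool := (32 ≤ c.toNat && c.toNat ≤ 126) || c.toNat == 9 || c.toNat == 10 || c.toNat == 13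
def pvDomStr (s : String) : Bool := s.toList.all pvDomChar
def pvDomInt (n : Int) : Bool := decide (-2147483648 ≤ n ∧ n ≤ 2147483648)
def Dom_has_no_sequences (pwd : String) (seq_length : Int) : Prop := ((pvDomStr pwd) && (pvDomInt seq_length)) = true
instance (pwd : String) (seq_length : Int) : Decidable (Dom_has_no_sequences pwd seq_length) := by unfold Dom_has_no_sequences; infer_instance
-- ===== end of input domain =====

-- B replaces A's precomputed table of every ascending/descending alphabet/digit run (rebuilt and scanned for
-- each window) by a direct per-window test (same character class + unit steps); objective: alternative.

-- ===== PORT A =====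
-- string.ascii_lowercase / string.digits
def pvAlphabet : List Char := "abcdefghijklmnopqrstuvwxyz".toList
def pvDigits : List Char := "0123456789".toList

-- the `sequences` list A builds (two append loops; `[::-1]` is reverse, cf. PySem.List.slice?_none_none_neg_one)
def pvSequences (seq_length : Int) : List (List Char) :=
  let s1 := (PySem.List.pyRange 0 ((pvAlphabet.length : Int) - seq_length + 1) 1).foldl
    (fun acc i =>
      acc ++ [PySem.List.slice pvAlphabet (some i) (some (i + seq_length)),
              (PySem.List.slice pvAlphabet (some i) (some (i + seq_length))).reverse]) []
  (PySem.List.pyRange 0 ((pvDigits.length : Int) - seq_length + 1) 1).foldl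
    (fun acc i =>
      acc ++ [PySem.List.slice pvDigits (some i) (some (i + seq_length)),
              (PySem.List.slice pvDigits (some i) (some (i + seq_length))).reverse]) s1

def has_no_sequences (pwd : String) (seq_length : Int) : Bool :=
  if (PySem.Str.len pwd : Int) < seq_length then true
  else
    let sequences := pvSequences seq_length
    let pwd_lower := PySem.Chars.lower pwd.toList
    -- `for i in range(...): if segment in sequences: return False` then `return True`
    !((PySem.List.pyRange 0 ((pwd_lower.length : Int) - seq_length + 1) 1).any
        (fun i => decide (PySem.List.slice pwd_lower (some i) (some (i + seq_length)) ∈ sequences)))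

-- ===== PORT B =====
-- body of B's loop: adjacent steps all +1 or all -1, and window all in one character class
def pvIsSeqWindow (w : List Char) : Bool :=
  ((w.zip w.tail).all (fun p => ((p.2.toNat : Int) - (p.1.toNat : Int)) == 1) ||
   (w.zip w.tail).all (fun p => ((p.1.toNat : Int) - (p.2.toNat : Int)) == 1)) &&
  (w.all (fun c => 'a' ≤ c && c ≤ 'z') || w.all (fun c => '0' ≤ c && c ≤ '9'))

-- quick per-window reject B does first: `if len(w) >= 2: d = ord(w[1]) - ord(w[0]); if d != 1 and d != -1: continue`
def pvQuickSkip (w : List Char) : Bool :=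
  decide (2 ≤ w.length) &&
  (let d : Int := ((PySem.List.pyGetD w 1 ' ').toNat : Int) - ((PySem.List.pyGetD w 0 ' ').toNat : Int)
   decide (d ≠ 1 ∧ d ≠ -1))

def has_no_sequences_alt (pwd : String) (seq_length : Int) : Bool :=
  if (PySem.Str.len pwd : Int) < seq_length then true
  else
    let low := PySem.Chars.lower pwd.toList
    !((PySem.List.pyRange 0 ((low.length : Int) - seq_length + 1) 1).any
        (fun i =>
          let w := PySem.List.slice low (some i) (some (i + seq_length))
          if pvQuickSkip w then false else pvIsSeqWindow w))

-- ===== PRECONDITION & SPEC =====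
def Spec_has_no_sequences (pwd : String) (seq_length : Int) (out : Bool) : Prop := out = has_no_sequences_alt pwd seq_length
instance (pwd : String) (seq_length : Int) (out : Bool) : Decidable (Spec_has_no_sequences pwd seq_length out) := by unfold Spec_has_no_sequences; infer_instance

-- ===== CLAIM (what is proved, stated in full; the proofs are below) =====
def Claim_equal_has_no_sequences : Prop := ∀ (pwd : String) (seq_length : Int), Dom_has_no_sequences pwd seq_length → Spec_has_no_sequences pwd seq_length (has_no_sequences pwd seq_length)

-- ===== LEMMAS AND PROOFS =====

-- the consecutive run c0, c0+1, …, c0+n-1 as characters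
def pvRun (c0 n : Nat) : List Char := (List.range n).map (fun k => Char.ofNat (c0 + k))

-- ascending-by-one relation on adjacent characters
def pvS (a b : Char) : Prop := b.toNat = a.toNat + 1

lemma length_pvRun (c0 n : Nat) : (pvRun c0 n).length = n := by simp [pvRun]

lemma pvRun_succ (c0 n : Nat) :
    pvRun c0 (n + 1) = Char.ofNat c0 :: pvRun (c0 + 1) n := by
  simp [pvRun, List.range_succ_eq_map, List.map_map, Function.comp_def,
    Nat.add_comm, Nat.add_left_comm]

lemma char_le_iff_toNat (a b : Char) : a ≤ b ↔ a.toNat ≤ b.toNat := by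
  simp [Char.le_def, UInt32.le_iff_toNat_le]

lemma pvAsc_iff (w : List Char) :
    (w.zip w.tail).all (fun p => ((p.2.toNat : Int) - (p.1.toNat : Int)) == 1) = true
      ↔ w.IsChain pvS := by
  induction w with
  | nil => simp
  | cons a t ih =>
    cases t with
    | nil => simp
    | cons b t' =>
      simp only [List.tail_cons, List.zip_cons_cons, List.all_cons, Bool.and_eq_true,
        List.isChain_cons_cons] at ih ⊢
      constructor
      · rintro ⟨h1, h2⟩; exact ⟨by simp at h1; simp [pvS]; omega, ih.1 h2⟩
      · rintro ⟨h1, h2⟩; exact ⟨by simp [pvS] at h1; simp; omega, ih.2 h2⟩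

lemma pvDesc_iff (w : List Char) :
    (w.zip w.tail).all (fun p => ((p.1.toNat : Int) - (p.2.toNat : Int)) == 1) = true
      ↔ w.IsChain (fun a b => pvS b a) := by
  induction w with
  | nil => simp
  | cons a t ih =>
    cases t with
    | nil => simp
    | cons b t' =>
      simp only [List.tail_cons, List.zip_cons_cons, List.all_cons, Bool.and_eq_true,
        List.isChain_cons_cons] at ih ⊢
      constructor
      · rintro ⟨h1, h2⟩; exact ⟨by simp at h1; simp [pvS]; omega, ih.1 h2⟩
      · rintro ⟨h1, h2⟩; exact ⟨by simp [pvS] at h1; simp; omega, ih.2 h2⟩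

lemma chain_eq_run (w : List Char) (hne : w ≠ []) (h : w.IsChain pvS) :
    w = pvRun (w.head hne).toNat w.length := by
  induction w with
  | nil => exact absurd rfl hne
  | cons a t ih =>
    cases t with
    | nil => simp [pvRun, Char.ofNat_toNat]
    | cons b t' =>
      rw [List.isChain_cons_cons] at h
      have h1 : b.toNat = a.toNat + 1 := h.1
      have hb : b :: t' = pvRun b.toNat (t'.length + 1) := by simpa using ih (by simp) h.2
      simp only [List.head_cons, List.length_cons]
      rw [pvRun_succ, Char.ofNat_toNat]
      rw [show a :: b :: t' = a :: (b :: t') from rfl, hb, h1]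

lemma code_bounds (m lo hi : Nat) (h1 : 1 ≤ lo)
    (hlo : lo ≤ (Char.ofNat m).toNat) (hhi : (Char.ofNat m).toNat ≤ hi) :
    lo ≤ m ∧ m ≤ hi := by
  rw [Char.toNat_ofNat] at hlo hhi
  split_ifs at hlo hhi with h
  · exact ⟨hlo, hhi⟩
  · omega

lemma toNat_ofNat_of_le (m : Nat) (hv : m ≤ 1024) : (Char.ofNat m).toNat = m := by
  rw [Char.toNat_ofNat, if_pos]; left; omega

lemma run_chain (c0 n : Nat) (hv : c0 + n ≤ 1024) : (pvRun c0 n).IsChain pvS := by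
  induction n generalizing c0 with
  | zero => simp [pvRun]
  | succ n ih =>
    rw [pvRun_succ]
    cases n with
    | zero => simp [pvRun]
    | succ m =>
      rw [pvRun_succ, List.isChain_cons_cons, ← pvRun_succ]
      refine ⟨?_, ih (c0 + 1) (by omega)⟩
      simp only [pvS]
      rw [toNat_ofNat_of_le _ (by omega), toNat_ofNat_of_le _ (by omega)]

lemma mem_pvRun_toNat (c0 n : Nat) (hv : c0 + n ≤ 1024) (c : Char) (hc : c ∈ pvRun c0 n) :
    c0 ≤ c.toNat ∧ c.toNat < c0 + n := by
  simp only [pvRun, List.mem_map, List.mem_range] at hc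
  obtain ⟨k, hk, rfl⟩ := hc
  rw [toNat_ofNat_of_le _ (by omega)]
  omega

lemma slice_pvRun (c0 n : Nat) (i L : Int) (h0 : 0 ≤ i) (hL : 0 ≤ L) (hn : i + L ≤ n) :
    PySem.List.slice (pvRun c0 n) (some i) (some (i + L)) = pvRun (c0 + i.toNat) L.toNat := by
  rw [PySem.List.slice_toNat _ h0 (by omega)]
  apply List.ext_getElem
  · simp [length_pvRun]; omega
  · intro k hk1 hk2
    simp only [List.getElem_take, List.getElem_drop, pvRun, List.getElem_map, List.getElem_range]
    congr 1
    omega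

lemma asc_case (c0 n : Nat) (h1 : 1 ≤ c0) (L : Int) (hL : 1 ≤ L)
    (w : List Char) (hw : (w.length : Int) = L)
    (hclass : ∀ c ∈ w, c0 ≤ c.toNat ∧ c.toNat ≤ c0 + n - 1)
    (hchain : w.IsChain pvS) :
    ∃ i, (0 ≤ i ∧ i < (n : Int) - L + 1) ∧
      w = PySem.List.slice (pvRun c0 n) (some i) (some (i + L)) := by
  have hne : w ≠ [] := by
    intro h; subst h; simp at hw; omega
  have hrun := chain_eq_run w hne hchain
  have hhead := hclass _ (List.head_mem hne)
  have hlastmem : Char.ofNat ((w.head hne).toNat + (w.length - 1)) ∈ w := by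
    have hm : Char.ofNat ((w.head hne).toNat + (w.length - 1))
        ∈ pvRun (w.head hne).toNat w.length := by
      simp only [pvRun, List.mem_map, List.mem_range]
      exact ⟨w.length - 1, by omega, rfl⟩
    rw [← hrun] at hm
    exact hm
  have hlast := hclass _ hlastmem
  have hb := code_bounds _ c0 (c0 + n - 1) (by omega) hlast.1 hlast.2
  refine ⟨((w.head hne).toNat : Int) - c0, ⟨by omega, by omega⟩, ?_⟩
  rw [slice_pvRun c0 n _ L (by omega) (by omega) (by omega)]
  conv_lhs => rw [hrun]
  congr 1
  · omega
  · omega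

lemma windows_iff (c0 n : Nat) (h1 : 1 ≤ c0) (hv : c0 + n ≤ 1024) (L : Int) (hL : 1 ≤ L)
    (w : List Char) (hw : (w.length : Int) = L) :
    (∃ i, i ∈ PySem.List.pyRange 0 ((n : Int) - L + 1) 1 ∧
        (w = PySem.List.slice (pvRun c0 n) (some i) (some (i + L)) ∨
         w = (PySem.List.slice (pvRun c0 n) (some i) (some (i + L))).reverse))
      ↔ ((∀ c ∈ w, c0 ≤ c.toNat ∧ c.toNat ≤ c0 + n - 1) ∧
         (w.IsChain pvS ∨ w.IsChain (fun a b => pvS b a))) := by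
  constructor
  · rintro ⟨i, hi, hcase⟩
    rw [PySem.List.mem_pyRange_one] at hi
    rw [slice_pvRun c0 n i L hi.1 (by omega) (by omega)] at hcase
    have hmem : ∀ c ∈ pvRun (c0 + i.toNat) L.toNat, c0 ≤ c.toNat ∧ c.toNat ≤ c0 + n - 1 := by
      intro c hc
      have := mem_pvRun_toNat (c0 + i.toNat) L.toNat (by omega) c hc
      omega
    have hch : (pvRun (c0 + i.toNat) L.toNat).IsChain pvS := run_chain _ _ (by omega)
    rcases hcase with rfl | rfl
    · exact ⟨hmem, Or.inl hch⟩
    · refine ⟨fun c hc => hmem c (List.mem_reverse.mp hc), Or.inr ?_⟩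
      rw [List.isChain_reverse]
      exact hch
  · rintro ⟨hclass, hasc | hdesc⟩
    · obtain ⟨i, hi, heq⟩ := asc_case c0 n h1 L hL w hw hclass hasc
      exact ⟨i, PySem.List.mem_pyRange_one.mpr hi, Or.inl heq⟩
    · have hch : w.reverse.IsChain pvS := List.isChain_reverse.mpr hdesc
      obtain ⟨i, hi, heq⟩ := asc_case c0 n h1 L hL w.reverse (by simpa using hw)
        (fun c hc => hclass c (List.mem_reverse.mp hc)) hch
      refine ⟨i, PySem.List.mem_pyRange_one.mpr hi, Or.inr ?_⟩
      rw [← heq, List.reverse_reverse]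

lemma pvAlphabet_run : pvAlphabet = pvRun 97 26 := by decide
lemma pvDigits_run : pvDigits = pvRun 48 10 := by decide

lemma lower_class_iff (w : List Char) :
    w.all (fun c => 'a' ≤ c && c ≤ 'z') = true ↔ ∀ c ∈ w, 97 ≤ c.toNat ∧ c.toNat ≤ 97 + 26 - 1 := by
  simp [List.all_eq_true, char_le_iff_toNat]

lemma digit_class_iff (w : List Char) :
    w.all (fun c => '0' ≤ c && c ≤ '9') = true ↔ ∀ c ∈ w, 48 ≤ c.toNat ∧ c.toNat ≤ 48 + 10 - 1 := by
  simp [List.all_eq_true, char_le_iff_toNat]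

lemma sequences_flat (L : Int) :
    pvSequences L =
      (PySem.List.pyRange 0 (26 - L + 1) 1).flatMap
        (fun i => [PySem.List.slice pvAlphabet (some i) (some (i + L)),
                   (PySem.List.slice pvAlphabet (some i) (some (i + L))).reverse]) ++
      (PySem.List.pyRange 0 (10 - L + 1) 1).flatMap
        (fun i => [PySem.List.slice pvDigits (some i) (some (i + L)),
                   (PySem.List.slice pvDigits (some i) (some (i + L))).reverse]) := by
  show (PySem.List.pyRange 0 ((pvDigits.length : Int) - L + 1) 1).foldl _ _ = _
  rw [PySem.List.foldl_append_eq_flatMap, PySem.List.foldl_append_eq_flatMap]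
  simp [pvAlphabet, pvDigits]

lemma mem_sequences_iff (L : Int) (hL : 1 ≤ L) (w : List Char) (hw : (w.length : Int) = L) :
    w ∈ pvSequences L ↔ pvIsSeqWindow w = true := by
  have ha := windows_iff 97 26 (by norm_num) (by norm_num) L hL w hw
  have hd := windows_iff 48 10 (by norm_num) (by norm_num) L hL w hw
  push_cast at ha hd
  rw [sequences_flat, List.mem_append]
  simp only [List.mem_flatMap, List.mem_cons, List.not_mem_nil, or_false, pvAlphabet_run, pvDigits_run]
  rw [pvIsSeqWindow]
  simp only [Bool.and_eq_true, Bool.or_eq_true]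
  rw [lower_class_iff, digit_class_iff, pvAsc_iff, pvDesc_iff]
  constructor
  · rintro (⟨i, hi, hc⟩ | ⟨i, hi, hc⟩)
    · have := ha.mp ⟨i, by exact_mod_cast hi, hc⟩
      exact ⟨this.2, Or.inl this.1⟩
    · have := hd.mp ⟨i, by exact_mod_cast hi, hc⟩
      exact ⟨this.2, Or.inr this.1⟩
  · rintro ⟨hmono, hcl | hcd⟩
    · obtain ⟨i, hi, hc⟩ := ha.mpr ⟨hcl, hmono⟩
      exact Or.inl ⟨i, by exact_mod_cast hi, hc⟩
    · obtain ⟨i, hi, hc⟩ := hd.mpr ⟨hcd, hmono⟩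
      exact Or.inr ⟨i, by exact_mod_cast hi, hc⟩

lemma any_congr_mem {α : Type} (l : List α) (p q : α → Bool) (h : ∀ a ∈ l, p a = q a) :
    l.any p = l.any q := by
  induction l with
  | nil => rfl
  | cons x t ih =>
    simp only [List.any_cons]
    rw [h x (by simp), ih (fun a ha => h a (by simp [ha]))]

lemma slice_from_len_nil {α : Type} (xs : List α) (b : Int) :
    PySem.List.slice xs (some (xs.length : Int)) (some b) = [] := by
  apply List.eq_nil_of_length_eq_zero
  rw [PySem.List.length_slice]
  have h1 := PySem.List.clampIdx_le xs.length b
  have h2 : PySem.List.clampIdx xs.length (xs.length : Int) = xs.length := by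
    rw [PySem.List.clampIdx_natCast]; omega
  omega

lemma nil_mem_sequences (L : Int) (hL : L ≤ 0) : ([] : List Char) ∈ pvSequences L := by
  rw [sequences_flat, List.mem_append]
  right
  rw [List.mem_flatMap]
  refine ⟨10, PySem.List.mem_pyRange_one.mpr ⟨by norm_num, by omega⟩, ?_⟩
  have : PySem.List.slice pvDigits (some 10) (some (10 + L)) = [] := by
    have := slice_from_len_nil pvDigits (10 + L)
    simpa [pvDigits] using this
  simp [this]

-- the quick reject never changes the window verdict: a window failing it has a first step ≠ ±1
lemma quickSkip_eq (w : List Char) :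
    (if pvQuickSkip w then false else pvIsSeqWindow w) = pvIsSeqWindow w := by
  split_ifs with h
  · rw [pvQuickSkip] at h
    simp only [Bool.and_eq_true, decide_eq_true_iff] at h
    obtain ⟨h2, hd⟩ := h
    match w, h2 with
    | a :: b :: t, _ =>
      have hb : PySem.List.pyGetD (a :: b :: t) 1 ' ' = b := by
        have h1 := PySem.List.pyGetD_ofNat' (xs := a :: b :: t) (k := 1) (d := ' ')
        simpa using h1
      have ha : PySem.List.pyGetD (a :: b :: t) 0 ' ' = a := PySem.List.pyGetD_zero_cons _ _ _
      rw [hb, ha] at hd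
      symm
      rw [pvIsSeqWindow]
      simp only [List.tail_cons, List.zip_cons_cons, List.all_cons]
      have e1 : (((b.toNat : Int) - (a.toNat : Int)) == 1) = false := by
        simp; omega
      have e2 : (((a.toNat : Int) - (b.toNat : Int)) == 1) = false := by
        simp; omega
      rw [e1, e2]
      simp
  · rfl

lemma has_no_sequences_eq_alt (pwd : String) (L : Int) :
    has_no_sequences pwd L = has_no_sequences_alt pwd L := by
  unfold has_no_sequences has_no_sequences_alt
  by_cases hg : (PySem.Str.len pwd : Int) < L
  · rw [if_pos hg, if_pos hg]
  · simp only [if_neg hg]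
    congr 1
    by_cases hL : 1 ≤ L
    · apply any_congr_mem
      intro i hi
      rw [PySem.List.mem_pyRange_one] at hi
      have hw : (((PySem.List.slice (PySem.Chars.lower pwd.toList) (some i) (some (i + L))).length : Int)) = L := by
        rw [PySem.List.slice_toNat _ hi.1 (by omega)]
        simp only [List.length_take, List.length_drop]
        omega
      rw [quickSkip_eq, Bool.eq_iff_iff, decide_eq_true_iff]
      exact mem_sequences_iff L hL _ hw
    · have hwit : ∀ p : Int → Bool, p ((PySem.Chars.lower pwd.toList).length : Int) = true →
          (PySem.List.pyRange 0 (((PySem.Chars.lower pwd.toList).length : Int) - L + 1) 1).any p = true := by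
        intro p hp
        exact List.any_eq_true.mpr ⟨_, PySem.List.mem_pyRange_one.mpr ⟨by positivity, by omega⟩, hp⟩
      rw [hwit _ ?_, hwit _ ?_]
      · rw [slice_from_len_nil]
        rfl
      · rw [slice_from_len_nil]
        simp [nil_mem_sequences L (by omega)]

-- ===== VERDICT (by name: the statement is the Claim_ definition above) =====
theorem has_no_sequences_spec : Claim_equal_has_no_sequences := by
  intro pwd seq_length _
  unfold Spec_has_no_sequences
  exact has_no_sequences_eq_alt pwd seq_length
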